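-- pv_equiv track=rewrite | github.com/jhvictoria/puj-multimedia | labs/2-compresion-imagen/dct.py | no_zeros
-- ===== SOURCE A (Python) =====
-- def no_zeros(l):
--     lenght=len(l)-1
--     flag=False
--     while(lenght>=0 and not(flag)):
--         if l[lenght]==0:
--             lenght-=1
--         else:
--             flag=True
--     l=l[:lenght+1]
--     return l
-- ===== SOURCE B (Python) =====
-- def _drop_leading_zeros(xs):
--     while xs and xs[0] == 0:
--         xs = xs[1:]
--     return xs
--
-- def no_zeros(l):
--     return list(reversed(_drop_leading_zeros(list(reversed(l)))))
-- ===== Notes on version B (the rewrite author's own statement) =====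
-- stated objective: idiomatic
-- what changed: Instead of scanning indices backwards with a flag and slicing, B reverses the list, drops its leading zeros, and reverses the remainder back.
import Mathlib
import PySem

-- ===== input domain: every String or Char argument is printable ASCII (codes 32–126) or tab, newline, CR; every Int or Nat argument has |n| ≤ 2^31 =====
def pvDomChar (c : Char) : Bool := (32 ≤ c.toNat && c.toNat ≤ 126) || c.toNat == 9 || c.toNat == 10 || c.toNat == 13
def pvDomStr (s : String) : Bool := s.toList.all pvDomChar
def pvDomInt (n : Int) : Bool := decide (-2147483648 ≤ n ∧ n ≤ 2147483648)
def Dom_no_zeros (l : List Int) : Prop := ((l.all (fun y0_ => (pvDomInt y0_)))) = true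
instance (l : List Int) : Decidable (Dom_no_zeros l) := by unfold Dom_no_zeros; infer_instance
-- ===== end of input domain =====

-- B strips trailing zeros by reversing, dropping leading zeros, and reversing back (idiomatic; same cost).

-- ===== PORT A =====
-- the while loop: `n` plays len(l)-1-…; returns the final value of `lenght` (-1 if all zeros)
def noZerosLoop (l : List Int) : Nat → Int
  | 0 => -1
  | n+1 => if PySem.List.pyGetD l ((n : Nat) : Int) 0 == 0 then noZerosLoop l n else (n : Int)

def no_zeros (l : List Int) : List Int :=
  PySem.List.slice l none (some (noZerosLoop l l.length + 1))

-- ===== PORT B =====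
-- helper _drop_leading_zeros from Source B
def dropLeadingZeros : List Int → List Int
  | [] => []
  | x :: xs => if x == 0 then dropLeadingZeros xs else x :: xs

def no_zeros_alt (l : List Int) : List Int :=
  (dropLeadingZeros l.reverse).reverse

-- ===== PRECONDITION & SPEC =====
def Spec_no_zeros (l : List Int) (out : List Int) : Prop := out = no_zeros_alt l
instance (l : List Int) (out : List Int) : Decidable (Spec_no_zeros l out) := by unfold Spec_no_zeros; infer_instance

-- ===== CLAIM (what is proved, stated in full; the proofs are below) =====
def Claim_equal_no_zeros : Prop := ∀ (l : List Int), Dom_no_zeros l → Spec_no_zeros l (no_zeros l)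

-- ===== LEMMAS AND PROOFS =====

theorem noZerosLoop_bounds (l : List Int) (n : Nat) :
    0 ≤ noZerosLoop l n + 1 ∧ noZerosLoop l n + 1 ≤ (n : Int) := by
  induction n with
  | zero => simp [noZerosLoop]
  | succ n ih =>
    simp only [noZerosLoop]
    split
    · omega
    · omega

theorem noZerosLoop_append (l : List Int) (a : Int) (n : Nat) (hn : n ≤ l.length) :
    noZerosLoop (l ++ [a]) n = noZerosLoop l n := by
  induction n with
  | zero => rfl
  | succ n ih =>
    have hlt : n < l.length := by omega
    simp only [noZerosLoop, PySem.List.pyGetD_natCast, List.getD,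
      List.getElem?_append_left hlt, ih (by omega)]

theorem no_zeros_eq_alt (l : List Int) : no_zeros l = no_zeros_alt l := by
  induction l using List.reverseRecOn with
  | nil => decide
  | append_singleton l a ih =>
    obtain ⟨h0, h1⟩ := noZerosLoop_bounds l l.length
    simp only [no_zeros, no_zeros_alt, List.length_append, List.length_singleton,
      noZerosLoop, PySem.List.pyGetD_natCast, List.getD, List.getElem?_append_right (le_refl _),
      Nat.sub_self, List.getElem?_cons_zero, Option.getD_some, List.reverse_append,
      List.reverse_singleton, List.singleton_append, dropLeadingZeros]
    split
    · -- a == 0 : the loop steps into l, and droping the leading 0 leaves dlz l.reverse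
      rw [noZerosLoop_append l a l.length (le_refl _)]
      have hk : noZerosLoop l l.length + 1 = ((noZerosLoop l l.length + 1).toNat : Int) := by omega
      rw [hk, PySem.List.slice_to_natCast,
        List.take_append_of_le_length (by omega)]
      have ih' := ih
      unfold no_zeros no_zeros_alt at ih'
      rw [hk, PySem.List.slice_to_natCast] at ih'
      exact ih'
    · -- a ≠ 0 : the whole list is kept
      have : ((l.length : Int) + 1) = (((l.length + 1 : Nat)) : Int) := by push_cast; ring
      rw [this, PySem.List.slice_to_natCast, List.take_of_length_le (by simp)]
      simp

-- ===== VERDICT (by name: the statement is the Claim_ definition above) =====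
theorem no_zeros_spec : Claim_equal_no_zeros := by
  intro l _
  unfold Spec_no_zeros
  exact no_zeros_eq_alt l
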